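-- pv_equiv track=rewrite | github.com/visw2290/Scripts-Practice | Scripts-Pyc/number of vowels.py | VSent
-- ===== SOURCE A (Python) =====
-- def VSent(sentence):
--     vowels = 'aeiou'
--     dict1={}
--     for letter in sentence:
--         if letter.lower() in vowels:
--             dict1.setdefault(letter,0)
--             dict1[letter] += 1
--     return dict1
-- ===== SOURCE B (Python) =====
-- def _runs(srt):
--     # counts of a sorted character list: strip the leading run, recurse on the rest
--     if not srt:
--         return {}
--     c = srt[0]
--     k = 1
--     while k < len(srt) and srt[k] == c:
--         k += 1
--     counts = _runs(srt[k:])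
--     counts[c] = k
--     return counts
--
-- def VSent(sentence):
--     vowels = [ch for ch in sentence if ch.lower() in 'aeiou']
--     counts = _runs(sorted(vowels))
--     return {ch: counts.get(ch, 0) for ch in dict.fromkeys(vowels)}
-- ===== Notes on version B (the rewrite author's own statement) =====
-- stated objective: alternative
-- what changed: A's single accumulating pass with dict.setdefault per-letter increments is replaced by a sort-then-group algorithm: filter the vowel characters, sort them, compute each count by recursively stripping the leading run of the sorted list, then emit keys in first-occurrence order.
import Mathlib
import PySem

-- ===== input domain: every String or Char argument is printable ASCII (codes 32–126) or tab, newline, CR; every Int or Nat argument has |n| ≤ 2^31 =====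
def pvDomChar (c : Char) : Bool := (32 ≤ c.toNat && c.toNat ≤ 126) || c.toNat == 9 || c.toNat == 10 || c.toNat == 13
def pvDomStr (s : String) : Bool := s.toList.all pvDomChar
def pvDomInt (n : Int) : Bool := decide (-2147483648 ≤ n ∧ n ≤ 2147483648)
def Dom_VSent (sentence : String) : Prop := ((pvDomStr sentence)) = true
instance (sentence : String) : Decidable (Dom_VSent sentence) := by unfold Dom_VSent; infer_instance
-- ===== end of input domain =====

-- B replaces A's one-pass setdefault accumulation by a sort-then-group algorithm:
-- filter the vowels, sort them, count by recursively stripping the leading run of the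
-- sorted list, then emit the keys in first-occurrence order (alternative algorithm).

-- shared helper: the test `X.lower() in 'aeiou'` that appears verbatim in both Pythons
def pvIsVowel (c : Char) : Bool :=
  PySem.Chars.isIn [PySem.Chars.lowerChar c] ['a', 'e', 'i', 'o', 'u']

-- a one-character Python string (the loop variable / the dict key)
def pvKey (c : Char) : String := String.ofList [c]

-- ===== PORT A =====
-- body of A's for-loop: setdefault(letter, 0) then dict1[letter] += 1
def vsentStep (d : PySem.Dict String Int) (c : Char) : PySem.Dict String Int :=
  if pvIsVowel c then
    let d1 := d.setdefault (pvKey c) 0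
    d1.insert (pvKey c) (d1.getD (pvKey c) 0 + 1)
  else d

def VSent (sentence : String) : List (String × Int) :=
  (sentence.toList.foldl vsentStep PySem.Dict.empty).items

-- ===== PORT B =====
-- the while loop of _runs: how far `k` advances past index 0 (srt[k] == c while it holds)
def pvRunlen (c : Char) : List Char → Nat
  | [] => 0
  | x :: t => if x == c then 1 + pvRunlen c t else 0

theorem pvRunlen_le (c : Char) : ∀ (t : List Char), pvRunlen c t ≤ t.length := by
  intro t
  induction t with
  | nil => simp [pvRunlen]
  | cons x t ih =>
    simp only [pvRunlen, List.length_cons]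
    split <;> omega

-- _runs: strip the leading run of the sorted list, recurse, record its length
def pvRuns : List Char → PySem.Dict String Int
  | [] => PySem.Dict.empty
  | c :: t =>
    let k := 1 + pvRunlen c t
    (pvRuns (t.drop (pvRunlen c t))).insert (pvKey c) (k : Int)
termination_by srt => srt.length
decreasing_by
  have := pvRunlen_le c t
  simp only [List.length_drop, List.length_cons]
  omega

def VSent_alt (sentence : String) : List (String × Int) :=
  let vowels := sentence.toList.filter pvIsVowel
  let counts := pvRuns (PySem.List.sorted vowels (fun x => x) false)
  (PySem.List.dedup vowels).map (fun c => (pvKey c, counts.getD (pvKey c) 0))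

-- ===== PRECONDITION & SPEC =====
def Spec_VSent (sentence : String) (out : List (String × Int)) : Prop := out = VSent_alt sentence
instance (sentence : String) (out : List (String × Int)) : Decidable (Spec_VSent sentence out) := by unfold Spec_VSent; infer_instance

-- ===== CLAIM (what is proved, stated in full; the proofs are below) =====
def Claim_equal_VSent : Prop := ∀ (sentence : String), Dom_VSent sentence → Spec_VSent sentence (VSent sentence)

-- ===== LEMMAS AND PROOFS =====

theorem pvKey_inj {x c : Char} (h : pvKey x = pvKey c) : x = c := by
  have := congrArg String.toList h
  simp [pvKey] at this
  exact this

theorem pvKey_beq (x c : Char) : (pvKey x == pvKey c) = (x == c) := by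
  by_cases h : x = c
  · simp [h]
  · simp [h]
    intro hh
    exact absurd (pvKey_inj hh) h

-- the distinct vowels seen so far, in first-occurrence order
def seenv (l : List Char) : List Char := (PySem.List.dedup l).filter pvIsVowel

theorem mem_seenv {l : List Char} {x : Char} :
    x ∈ seenv l ↔ x ∈ l ∧ pvIsVowel x = true := by
  simp [seenv, List.mem_filter, PySem.List.dedup_eq_ofList, PySem.Set.mem_ofList]

theorem seenv_append (l : List Char) (c : Char) :
    seenv (l ++ [c]) =
      if pvIsVowel c = true ∧ c ∉ l then seenv l ++ [c] else seenv l := by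
  unfold seenv
  rw [PySem.List.dedup_eq_ofList, PySem.List.dedup_eq_ofList, PySem.Set.ofList_append_singleton]
  unfold PySem.Set.add
  by_cases hmem : c ∈ PySem.Set.ofList l
  · have hcl : c ∈ l := (PySem.Set.mem_ofList l c).mp hmem
    simp [hcl]
  · have hcl : c ∉ l := fun h => hmem ((PySem.Set.mem_ofList l c).mpr h)
    simp [hcl, List.filter_append]
    by_cases hv : pvIsVowel c = true <;> simp [hv]

theorem find?_key (seen : List Char) (c : Char) (g : Char → Int) :
    List.find? (fun p => p.1 == pvKey c) (seen.map (fun x => (pvKey x, g x)))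
      = if c ∈ seen then some (pvKey c, g c) else none := by
  induction seen with
  | nil => simp
  | cons h t ih =>
    by_cases hc : h = c
    · simp [hc]
    · simp only [List.map_cons, List.find?_cons, pvKey_beq]
      have hb : (h == c) = false := by simp [hc]
      have hch : ¬ c = h := fun e => hc e.symm
      simp [hb, ih, hch]

theorem contains_key (seen : List Char) (c : Char) (g : Char → Int) :
    (PySem.Dict.mk (seen.map (fun x => (pvKey x, g x)))).contains (pvKey c)
      = decide (c ∈ seen) := by
  induction seen with
  | nil => simp [PySem.Dict.contains]
  | cons h t ih =>
    simp only [PySem.Dict.contains, List.map_cons, List.any_cons, pvKey_beq] at *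
    by_cases hc : h = c
    · simp [hc, ih]
    · have hch : ¬ c = h := fun e => hc e.symm
      simp [hc, hch, ih]

theorem getD_key (seen : List Char) (c : Char) (g : Char → Int) :
    (PySem.Dict.mk (seen.map (fun x => (pvKey x, g x)))).getD (pvKey c) 0
      = if c ∈ seen then g c else 0 := by
  simp only [PySem.Dict.getD, PySem.Dict.get?, find?_key]
  by_cases hc : c ∈ seen <;> simp [hc]

theorem pv_count_singleton {x c : Char} (h : x ≠ c) : List.count x [c] = 0 := by
  rw [List.count_eq_zero]
  simp [h]

-- loop invariant for A's fold: the dict's items are the seen vowels with their counts so far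
theorem vsent_inv (l : List Char) :
    (l.foldl vsentStep PySem.Dict.empty).items
      = (seenv l).map (fun x => (pvKey x, (l.count x : Int))) := by
  induction l using List.reverseRecOn with
  | nil => rfl
  | append_singleton l c ih =>
    rw [List.foldl_append, List.foldl_cons, List.foldl_nil]
    rw [seenv_append]
    by_cases hv : pvIsVowel c = true
    · by_cases hcl : c ∈ l
      · -- vowel already seen: setdefault is a no-op, insert overwrites in place
        rw [if_neg (fun hh : pvIsVowel c = true ∧ c ∉ l => hh.2 hcl)]
        have hcs : c ∈ seenv l := mem_seenv.mpr ⟨hcl, hv⟩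
        have hd : (l.foldl vsentStep PySem.Dict.empty) =
            PySem.Dict.mk ((seenv l).map (fun x => (pvKey x, (l.count x : Int)))) := by
          cases hdl : (l.foldl vsentStep PySem.Dict.empty)
          simp at ih ⊢
          rw [← ih, hdl]
        have hcont : (l.foldl vsentStep PySem.Dict.empty).contains (pvKey c) = true := by
          rw [hd, contains_key]
          simpa using hcs
        simp only [vsentStep, hv, if_true]
        rw [PySem.Dict.setdefault_of_contains _ _ hcont, hd]
        rw [getD_key]
        simp only [hcs, if_pos]
        unfold PySem.Dict.insert
        rw [contains_key]
        simp only [hcs, decide_true, if_true]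
        simp only [List.map_map]
        apply List.map_congr_left
        intro x hx
        by_cases hxc : x = c
        · simp [Function.comp, hxc, List.count_append]
        · have hb1 : (x == c) = false := by simp [hxc]
          simp [Function.comp, pvKey_beq, hb1, List.count_append, pv_count_singleton hxc]
      · -- new vowel: setdefault appends (letter, 0), the increment makes it 1
        rw [if_pos ⟨hv, hcl⟩]
        have hcs : c ∉ seenv l := fun h => hcl (mem_seenv.mp h).1
        have hd : (l.foldl vsentStep PySem.Dict.empty) =
            PySem.Dict.mk ((seenv l).map (fun x => (pvKey x, (l.count x : Int)))) := by
          cases hdl : (l.foldl vsentStep PySem.Dict.empty)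
          simp at ih ⊢
          rw [← ih, hdl]
        simp only [vsentStep, hv, if_true]
        rw [hd]
        have hcont : (PySem.Dict.mk ((seenv l).map (fun x => (pvKey x, (l.count x : Int))))).contains (pvKey c) = false := by
          rw [contains_key]; simpa using hcs
        unfold PySem.Dict.setdefault
        rw [hcont]
        simp only [Bool.false_eq_true, if_false]
        have happ : (seenv l).map (fun x => (pvKey x, (l.count x : Int))) ++ [(pvKey c, (0 : Int))]
            = (seenv l ++ [c]).map (fun x => (pvKey x, if x = c then (0 : Int) else (l.count x : Int))) := by
          simp only [List.map_append, List.map_cons, List.map_nil, if_pos]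
          congr 1
          apply List.map_congr_left
          intro x hx
          have hxc : x ≠ c := fun h => hcs (h ▸ hx)
          simp [hxc]
        rw [happ]
        unfold PySem.Dict.insert
        rw [contains_key]
        have hcseen : c ∈ seenv l ++ [c] := by simp
        simp only [hcseen, decide_true, if_true]
        rw [getD_key]
        simp only [hcseen, if_pos]
        simp only [List.map_map]
        apply List.map_congr_left
        intro x hx
        by_cases hxc : x = c
        · simp [Function.comp, hxc, List.count_append]
          exact List.count_eq_zero.mpr hcl
        · have hb1 : (x == c) = false := by simp [hxc]
          simp [Function.comp, pvKey_beq, hb1, hxc, List.count_append, pv_count_singleton hxc]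
    · -- not a vowel: the dict is unchanged and no seen vowel equals c
      rw [if_neg (fun h => hv h.1)]
      simp only [vsentStep, hv, Bool.false_eq_true, if_false]
      rw [ih]
      apply List.map_congr_left
      intro x hx
      have hxv : pvIsVowel x = true := (mem_seenv.mp hx).2
      have hxc : x ≠ c := fun h => hv (h ▸ hxv)
      simp [List.count_append, pv_count_singleton hxc]

-- ordered dedup commutes with filter
theorem dedup_filter (p : Char → Bool) (l : List Char) :
    PySem.List.dedup (l.filter p) = (PySem.List.dedup l).filter p := by
  induction l using List.reverseRecOn with
  | nil => rfl
  | append_singleton l c ih =>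
    rw [List.filter_append]
    by_cases hp : p c = true
    · simp only [List.filter_cons, hp, if_pos, List.filter_nil]
      rw [PySem.List.dedup_eq_ofList, PySem.List.dedup_eq_ofList,
          PySem.Set.ofList_append_singleton, PySem.Set.ofList_append_singleton]
      unfold PySem.Set.add
      simp only [PySem.List.dedup_eq_ofList] at ih
      by_cases hcl : c ∈ l
      · simp [hcl, hp, ih]
      · simp [hcl, List.filter_append, hp, ih]
    · have hpf : p c = false := by simpa using hp
      simp only [List.filter_cons, hpf, Bool.false_eq_true, if_false, List.filter_nil,
        List.append_nil]
      rw [PySem.List.dedup_eq_ofList, PySem.List.dedup_eq_ofList,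
          PySem.Set.ofList_append_singleton]
      unfold PySem.Set.add
      simp only [PySem.List.dedup_eq_ofList] at ih
      by_cases hcl : c ∈ l
      · simp [hcl, ih]
      · simp [hcl, List.filter_append, hpf, ih]

-- the leading run of c in t is a block of copies of c
theorem take_runlen (c : Char) (t : List Char) :
    t.take (pvRunlen c t) = List.replicate (pvRunlen c t) c := by
  induction t with
  | nil => simp [pvRunlen]
  | cons x t ih =>
    simp only [pvRunlen]
    by_cases hx : x = c
    · subst hx
      simp only [BEq.rfl, if_pos, Nat.add_comm 1 (pvRunlen x t)]
      simp only [List.take_succ_cons, ih]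
      rw [← List.replicate_succ, List.replicate_succ']
    · have : (x == c) = false := by simp [hx]
      simp [this]

-- in a sorted list headed by c, nothing after the leading run equals c
theorem not_mem_drop_runlen {c : Char} {t : List Char}
    (h : (c :: t).Pairwise (· ≤ ·)) : c ∉ t.drop (pvRunlen c t) := by
  induction t with
  | nil => simp [pvRunlen]
  | cons x t ih =>
    by_cases hx : x = c
    · subst hx
      have hx' : (x :: t).Pairwise (fun a b => a ≤ b) := (List.pairwise_cons.mp h).2
      simp only [pvRunlen, BEq.rfl, if_pos, Nat.add_comm 1 (pvRunlen x t),
        List.drop_succ_cons]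
      exact ih hx'
    · have hb : (x == c) = false := by simp [hx]
      simp only [pvRunlen, hb, Bool.false_eq_true, if_false, List.drop_zero]
      intro hmem
      rcases List.mem_cons.mp hmem with hcx | hct
      · exact hx hcx.symm
      · -- c ≤ x (head), x ≤ c impossible unless equal; from pairwise c ≤ x and x ≤ c ∈ t
        have hcx : c ≤ x := (List.pairwise_cons.mp h).1 x (List.mem_cons_self)
        have hxt : x ≤ c :=
          (List.pairwise_cons.mp (List.pairwise_cons.mp h).2).1 c hct
        exact hx (le_antisymm hxt hcx)

-- a pairwise-sorted suffix
theorem pairwise_drop_runlen {c : Char} {t : List Char}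
    (h : t.Pairwise (· ≤ ·)) : (t.drop (pvRunlen c t)).Pairwise (· ≤ ·) :=
  h.sublist (List.drop_sublist _ _)

-- run-length counting on a sorted list computes List.count
theorem pvRuns_getD_aux (n : Nat) : ∀ (s : List Char), s.length ≤ n →
    s.Pairwise (· ≤ ·) → ∀ (x : Char),
    (pvRuns s).getD (pvKey x) 0 = (s.count x : Int) := by
  induction n with
  | zero =>
    intro s hn _ x
    have : s = [] := List.eq_nil_of_length_eq_zero (Nat.le_zero.mp hn)
    subst this
    simp [pvRuns, PySem.Dict.getD_empty]
  | succ n ih =>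
    intro s hn hs x
    match s, hn, hs with
    | [], _, _ => simp [pvRuns, PySem.Dict.getD_empty]
    | c :: t, hn, hs =>
      rw [pvRuns]
      rw [PySem.Dict.getD_insert]
      have htp : t.Pairwise (· ≤ ·) := (List.pairwise_cons.mp hs).2
      have hlen : (t.drop (pvRunlen c t)).length ≤ n := by
        simp only [List.length_drop]
        simp only [List.length_cons] at hn
        omega
      have hrest := ih (t.drop (pvRunlen c t)) hlen (pairwise_drop_runlen htp)
      -- split t into its leading run and the rest
      have hsplit : t = List.replicate (pvRunlen c t) c ++ t.drop (pvRunlen c t) := by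
        conv_lhs => rw [← List.take_append_drop (pvRunlen c t) t]
        rw [take_runlen]
      by_cases hxc : pvKey x = pvKey c
      · have hx : x = c := pvKey_inj hxc
        subst hx
        rw [if_pos hxc]
        have hnot : x ∉ t.drop (pvRunlen x t) := not_mem_drop_runlen hs
        have : (x :: t).count x = 1 + pvRunlen x t := by
          conv_lhs => rw [hsplit]
          rw [← List.cons_append, List.count_append]
          simp [List.count_eq_zero.mpr hnot, List.count_cons_self]
          omega
        rw [this]
      · have hx : x ≠ c := fun h => hxc (h ▸ rfl)
        rw [if_neg hxc, hrest x]
        congr 1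
        conv_rhs => rw [hsplit]
        rw [← List.cons_append, List.count_append]
        have h1 : List.count x (c :: List.replicate (pvRunlen c t) c) = 0 := by
          rw [List.count_eq_zero]
          intro hmem
          rcases List.mem_cons.mp hmem with h' | h'
          · exact hx h'
          · exact hx (List.eq_of_mem_replicate h')
        omega

-- counting a vowel in the vowels-only sublist equals counting it in the sentence
theorem pvRuns_getD (s : List Char) (hs : s.Pairwise (· ≤ ·)) (x : Char) :
    (pvRuns s).getD (pvKey x) 0 = (s.count x : Int) :=
  pvRuns_getD_aux s.length s le_rfl hs x

theorem count_filter_vowel {x : Char} (hx : pvIsVowel x = true) (l : List Char) :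
    (l.filter pvIsVowel).count x = l.count x := by
  induction l with
  | nil => rfl
  | cons c t ih =>
    by_cases hc : c = x
    · subst hc
      simp [hx, List.count_cons_self, ih]
    · have hb : (c == x) = false := by simp [hc]
      by_cases hv : pvIsVowel c = true
      · simp [hv, List.count_cons, hb, ih]
      · simp [hv, List.count_cons, hb, ih]

-- ===== VERDICT (by name: the statement is the Claim_ definition above) =====
theorem VSent_spec : Claim_equal_VSent := by
  intro sentence _
  unfold Spec_VSent VSent VSent_alt
  rw [vsent_inv]
  unfold seenv
  rw [← dedup_filter]
  apply List.map_congr_left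
  intro x hx
  have hmem : x ∈ sentence.toList.filter pvIsVowel := by
    rw [PySem.List.dedup_eq_ofList, PySem.Set.mem_ofList] at hx
    exact hx
  have hxv : pvIsVowel x = true := (List.mem_filter.mp hmem).2
  have hsorted := PySem.List.sorted_pairwise (sentence.toList.filter pvIsVowel) (fun x => x)
  rw [pvRuns_getD _ hsorted x]
  rw [(PySem.List.sorted_perm (sentence.toList.filter pvIsVowel) (fun x => x) false).count_eq]
  rw [count_filter_vowel hxv]
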